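-- pv_equiv track=rewrite | github.com/wns0394/BaekJoon | 백준/Gold/1941. 소문난 칠공주/소문난 칠공주.py | check_7
-- ===== SOURCE A (Python) =====
-- from collections import deque
--
-- def check_7(a):
--     q = deque()
--     q.append((a[0][0], a[0][1]))
--
--     visited = [0] * 7
--
--     while q:
--         x, y = q.popleft()
--
--         for i in range(4):
--             nx = x + dx[i]
--             ny = y + dy[i]
--
--             if (nx, ny) in a and visited[a.index((nx, ny))] == 0:
--                 q.append((nx, ny))
--                 visited[a.index((nx, ny))] = 1
--     if 0 in visited:
--         return False
--     return True
--
-- dx = [-1, 0, 1, 0]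
--
-- dy = [0, 1, 0, -1]
-- ===== SOURCE B (Python) =====
-- def check_7(a):
--     # Union-find by label merging: give each cell its own label, merge the
--     # labels of every orthogonally adjacent pair; the chosen cells qualify
--     # iff there are exactly 7 of them and one label remains.
--     comp = list(range(len(a)))
--     for i in range(len(a)):
--         for j in range(i):
--             if abs(a[i][0] - a[j][0]) + abs(a[i][1] - a[j][1]) == 1:
--                 ci, cj = comp[i], comp[j]
--                 if ci != cj:
--                     comp = [cj if c == ci else c for c in comp]
--     return len(a) == 7 and all(c == comp[0] for c in comp)
-- ===== Notes on version B (the rewrite author's own statement) =====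
-- stated objective: simpler
-- what changed: The deque BFS with a fixed-size visited array and repeated list membership/index scans is replaced by union-find via label merging: each cell gets its own label, labels of every orthogonally adjacent pair are merged, and the cells qualify iff there are exactly seven of them and one label remains.
-- outside the precondition, e.g. on check_7([(0, 0), (0, 1), (0, 1), (0, 2), (0, 3), (0, 4), (0, 5)]): A returns False, B returns True
import Mathlib
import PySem

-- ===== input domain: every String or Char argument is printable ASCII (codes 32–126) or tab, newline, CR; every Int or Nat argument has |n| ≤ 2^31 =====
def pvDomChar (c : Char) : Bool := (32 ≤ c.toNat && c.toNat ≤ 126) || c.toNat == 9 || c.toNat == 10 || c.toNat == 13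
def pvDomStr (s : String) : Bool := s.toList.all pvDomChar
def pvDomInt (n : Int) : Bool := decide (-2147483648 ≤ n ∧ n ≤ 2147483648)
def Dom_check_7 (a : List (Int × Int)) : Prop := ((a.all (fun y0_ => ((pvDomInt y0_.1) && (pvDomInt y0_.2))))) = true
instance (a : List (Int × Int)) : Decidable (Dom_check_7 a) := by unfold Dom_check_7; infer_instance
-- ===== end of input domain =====

-- B replaces A's deque BFS (fixed-size visited array, repeated membership/index scans)
-- by union-find via label merging over all orthogonally adjacent pairs; objective: simpler.


-- ===== PORT A =====

def pvDx : List Int := [-1, 0, 1, 0]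
def pvDy : List Int := [0, 1, 0, -1]

def bfsStep (a : List (Int × Int)) (x y : Int) (st : List (Int × Int) × List Int)
    (i : Nat) : List (Int × Int) × List Int :=
  let nx := x + pvDx.getD i 0
  let ny := y + pvDy.getD i 0
  if (nx, ny) ∈ a ∧ st.2.getD (a.idxOf (nx, ny)) 1 = 0 then
    (st.1 ++ [(nx, ny)], st.2.set (a.idxOf (nx, ny)) 1)
  else st

theorem count0_set_lt (v : List Int) (idx : Nat) (h : v.getD idx 1 = 0) :
    (v.set idx 1).count 0 < v.count 0 := by
  induction v generalizing idx with
  | nil => simp at h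
  | cons hd tl ih =>
    cases idx with
    | zero => simp_all [List.count_cons]
    | succ n =>
      simp only [List.getD_cons_succ] at h
      have := ih n h
      simp [List.count_cons]
      omega

theorem bfsStep_cases (a : List (Int × Int)) (x y : Int) (st : List (Int × Int) × List Int)
    (i : Nat) : bfsStep a x y st i = st ∨ (bfsStep a x y st i).2.count 0 < st.2.count 0 := by
  simp only [bfsStep]
  split
  · next h => exact Or.inr (count0_set_lt _ _ h.2)
  · exact Or.inl rfl

theorem bfsFold_measure (l : List Nat) (a : List (Int × Int)) (x y : Int)
    (q : List (Int × Int)) (vis : List Int) :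
    (l.foldl (bfsStep a x y) (q, vis)).2.count 0 < vis.count 0 ∨
      l.foldl (bfsStep a x y) (q, vis) = (q, vis) := by
  induction l generalizing q vis with
  | nil => exact Or.inr rfl
  | cons i l ih =>
    simp only [List.foldl_cons]
    rcases bfsStep_cases a x y (q, vis) i with h | h
    · rw [h]; exact ih q vis
    · left
      rcases hst : bfsStep a x y (q, vis) i with ⟨q', vis'⟩
      rw [hst] at h
      rcases ih q' vis' with h2 | h2
      · exact lt_trans h2 h
      · rw [h2]; exact h

def bfsLoop (a : List (Int × Int)) (q : List (Int × Int)) (vis : List Int) : Bool :=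
  match q with
  | [] => if (0 : Int) ∈ vis then false else true
  | (x, y) :: rest =>
      let st := (List.range 4).foldl (bfsStep a x y) (rest, vis)
      bfsLoop a st.1 st.2
termination_by (vis.count 0, q.length)
decreasing_by
  rcases bfsFold_measure (List.range 4) a x y rest vis with h1 | h1
  · exact Prod.Lex.left _ _ h1
  · rw [h1]; exact Prod.Lex.right _ (by simp)

def check_7 (a : List (Int × Int)) : Bool :=
  bfsLoop a [((a.getD 0 (0, 0)).1, (a.getD 0 (0, 0)).2)] (List.replicate 7 0)


-- ===== PORT B =====
def mergeAt (comp : List Int) (i j : Nat) : List Int :=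
  let ci := comp.getD i 0
  let cj := comp.getD j 0
  if ci ≠ cj then comp.map (fun c => if c = ci then cj else c) else comp


def check_7_alt (a : List (Int × Int)) : Bool :=
  let comp := (List.range a.length).foldl (fun comp i =>
      (List.range i).foldl (fun comp j =>
        if ((a.getD i (0, 0)).1 - (a.getD j (0, 0)).1).natAbs +
            ((a.getD i (0, 0)).2 - (a.getD j (0, 0)).2).natAbs = 1 then
          mergeAt comp i j
        else comp) comp)
    ((List.range a.length).map Int.ofNat)
  decide (a.length = 7) && comp.all (fun c => c == comp.getD 0 0)


-- ===== PRECONDITION & SPEC =====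
-- Pre_ excludes the empty list (a[0] raises IndexError), lists longer than 7 (A's fixed-size
-- visited array raises IndexError as soon as a discovered cell has first index ≥ 7, and where it
-- happens not to raise its value is an accident of which indices the BFS reaches), and length-7
-- lists with duplicate cells (a defensible-corner artefact: A's first-index bookkeeping never
-- visits the duplicate entry and answers False, while B treats the copies as one connected cell).
def Pre_check_7 (a : List (Int × Int)) : Prop :=
  a ≠ [] ∧ a.length ≤ 7 ∧ (a.length = 7 → a.Nodup)
instance (a : List (Int × Int)) : Decidable (Pre_check_7 a) := by unfold Pre_check_7; infer_instance
def pvWitness_check_7 : (List (Int × Int)) :=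
  [(0, 0), (0, 1), (0, 2), (0, 3), (0, 4), (0, 5), (0, 6)]

def Spec_check_7 (a : List (Int × Int)) (out : Bool) : Prop := out = check_7_alt a
instance (a : List (Int × Int)) (out : Bool) : Decidable (Spec_check_7 a out) := by unfold Spec_check_7; infer_instance

-- ===== CLAIM (what is proved, stated in full; the proofs are below) =====
def Claim_equal_check_7 : Prop := ∀ (a : List (Int × Int)), Dom_check_7 a → Pre_check_7 a → Spec_check_7 a (check_7 a)

-- ===== LEMMAS AND PROOFS =====

-- common spec
def pvCell (a : List (Int × Int)) (i : Nat) : Int × Int := a.getD i (0, 0)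
def pvAdj (a : List (Int × Int)) (i j : Nat) : Prop :=
  ((a.getD i (0, 0)).1 - (a.getD j (0, 0)).1).natAbs +
    ((a.getD i (0, 0)).2 - (a.getD j (0, 0)).2).natAbs = 1
def pvE (a : List (Int × Int)) (i j : Nat) : Prop := i < a.length ∧ j < a.length ∧ pvAdj a i j
def pvConn (a : List (Int × Int)) : Prop :=
  ∀ k, k < a.length → Relation.ReflTransGen (pvE a) 0 k

theorem pvAdj_symm (a : List (Int × Int)) (i j : Nat) (h : pvAdj a i j) : pvAdj a j i := by
  unfold pvAdj at h ⊢; omega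
theorem pvAdj_irrefl (a : List (Int × Int)) (i : Nat) : ¬ pvAdj a i i := by
  unfold pvAdj; omega
theorem pvE_symm (a : List (Int × Int)) : Symmetric (pvE a) := by
  rintro i j ⟨h1, h2, h3⟩; exact ⟨h2, h1, pvAdj_symm a i j h3⟩

def pvMarked (vis : List Int) (k : Nat) : Prop := vis.getD k 1 ≠ 0

theorem getD_set_self (v : List Int) (i : Nat) (h : i < v.length) (x : Int) :
    (v.set i x).getD i 1 = x := by
  rw [List.getD_eq_getElem _ _ (by simpa using h)]
  simp

theorem getD_set_ne (v : List Int) (i k : Nat) (x : Int) (h : i ≠ k) :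
    (v.set i x).getD k 1 = v.getD k 1 := by
  by_cases hk : k < v.length
  · rw [List.getD_eq_getElem _ _ (by simpa using hk), List.getD_eq_getElem _ _ hk]
    simp [h]
  · rw [List.getD_eq_default _ _ (by simpa using (Nat.le_of_not_lt hk)),
        List.getD_eq_default _ _ (Nat.le_of_not_lt hk)]

theorem neighbor_iff (x y nx ny : Int) :
    (∃ i, i < 4 ∧ nx = x + pvDx.getD i 0 ∧ ny = y + pvDy.getD i 0) ↔
      (x - nx).natAbs + (y - ny).natAbs = 1 := by
  constructor
  · rintro ⟨i, hi, rfl, rfl⟩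
    interval_cases i <;> simp [pvDx, pvDy] <;> try omega
  · intro h
    rcases (show (nx = x - 1 ∧ ny = y) ∨ (nx = x ∧ ny = y + 1) ∨ (nx = x + 1 ∧ ny = y) ∨
        (nx = x ∧ ny = y - 1) from by omega) with ⟨h1, h2⟩ | ⟨h1, h2⟩ | ⟨h1, h2⟩ | ⟨h1, h2⟩
    · exact ⟨0, by norm_num, by simp [pvDx]; omega, by simp [pvDy]; omega⟩
    · exact ⟨1, by norm_num, by simp [pvDx]; omega, by simp [pvDy]; omega⟩
    · exact ⟨2, by norm_num, by simp [pvDx]; omega, by simp [pvDy]; omega⟩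
    · exact ⟨3, by norm_num, by simp [pvDx]; omega, by simp [pvDy]; omega⟩

-- the inner for-loop of A: what folding the directions does to the state
theorem bfsFold_spec (a : List (Int × Int)) (x y : Int) (u : Nat)
    (h7 : a.length = 7) (hnd : a.Nodup) (hu : u < 7) (hcell : pvCell a u = (x, y)) :
    ∀ (l : List Nat), (∀ i ∈ l, i < 4) → ∀ (q0 : List (Int × Int)) (vis : List Int),
      vis.length = 7 →
      ((l.foldl (bfsStep a x y) (q0, vis)).2.length = 7 ∧
       (∀ k, pvMarked vis k → pvMarked (l.foldl (bfsStep a x y) (q0, vis)).2 k) ∧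
       (∀ k, k < 7 → pvMarked (l.foldl (bfsStep a x y) (q0, vis)).2 k →
          pvMarked vis k ∨ pvE a u k) ∧
       (∀ c, c ∈ q0 → c ∈ (l.foldl (bfsStep a x y) (q0, vis)).1) ∧
       (∀ c, c ∈ (l.foldl (bfsStep a x y) (q0, vis)).1 →
          c ∈ q0 ∨ ∃ v, v < 7 ∧ c = pvCell a v ∧ pvE a u v) ∧
       (∀ k, k < 7 → pvMarked (l.foldl (bfsStep a x y) (q0, vis)).2 k →
          pvMarked vis k ∨ pvCell a k ∈ (l.foldl (bfsStep a x y) (q0, vis)).1) ∧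
       (∀ v, v < 7 →
          (∃ i ∈ l, pvCell a v = (x + pvDx.getD i 0, y + pvDy.getD i 0)) →
          pvMarked (l.foldl (bfsStep a x y) (q0, vis)).2 v)) := by
  intro l
  induction l with
  | nil =>
    intro _ q0 vis hlen
    simp only [List.foldl_nil]
    refine ⟨hlen, fun k h => h, fun k _ h => Or.inl h, fun c h => h,
      fun c h => Or.inl h, fun k _ h => Or.inl h, fun v _ h => ?_⟩
    simp at h
  | cons i l ih =>
    intro hl q0 vis hlen
    have hi4 : i < 4 := hl i List.mem_cons_self
    have hl' : ∀ j ∈ l, j < 4 := fun j hj => hl j (List.mem_cons_of_mem _ hj)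
    simp only [List.foldl_cons]
    -- one step
    set nx := x + pvDx.getD i 0 with hnx
    set ny := y + pvDy.getD i 0 with hny
    by_cases hg : (nx, ny) ∈ a ∧ vis.getD (a.idxOf (nx, ny)) 1 = 0
    · -- the branch that marks and appends
      have hstep : bfsStep a x y (q0, vis) i =
          (q0 ++ [(nx, ny)], vis.set (a.idxOf (nx, ny)) 1) := by
        simp only [bfsStep, ← hnx, ← hny]
        rw [if_pos hg]
      set idx := a.idxOf (nx, ny) with hidxdef
      have hidx : idx < a.length := List.idxOf_lt_length_of_mem hg.1
      have hidx7 : idx < 7 := h7 ▸ hidx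
      have hcidx : pvCell a idx = (nx, ny) := by
        unfold pvCell
        rw [List.getD_eq_getElem _ _ hidx]
        exact List.getElem_idxOf hidx
      have hadj : pvAdj a u idx := by
        unfold pvAdj
        have h1 : pvCell a u = (x, y) := hcell
        unfold pvCell at h1 hcidx
        rw [h1, hcidx]
        rw [← neighbor_iff x y nx ny]
        exact ⟨i, hi4, hnx, hny⟩
      have hE : pvE a u idx := ⟨h7 ▸ hu, hidx, hadj⟩
      obtain ⟨s1, s2, s3, s4, s5, s6, s7⟩ :=
        ih hl' (q0 ++ [(nx, ny)]) (vis.set idx 1) (by simpa using hlen)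
      rw [hstep]
      have hmark_new : ∀ k, pvMarked (vis.set idx 1) k → pvMarked vis k ∨ k = idx := by
        intro k hk
        by_cases hkidx : idx = k
        · exact Or.inr hkidx.symm
        · unfold pvMarked at hk ⊢
          rw [getD_set_ne _ _ _ _ hkidx] at hk
          exact Or.inl hk
      have hmark_mono : ∀ k, pvMarked vis k → pvMarked (vis.set idx 1) k := by
        intro k hk
        by_cases hkidx : idx = k
        · subst hkidx
          unfold pvMarked
          rw [getD_set_self _ _ (hlen ▸ hidx7) 1]
          omega
        · unfold pvMarked at hk ⊢
          rw [getD_set_ne _ _ _ _ hkidx]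
          exact hk
      have hmark_idx : pvMarked (vis.set idx 1) idx := by
        unfold pvMarked
        rw [getD_set_self _ _ (hlen ▸ hidx7) 1]
        omega
      refine ⟨s1, ?_, ?_, ?_, ?_, ?_, ?_⟩
      · exact fun k hk => s2 k (hmark_mono k hk)
      · intro k hk7 hk
        rcases s3 k hk7 hk with hk' | hk'
        · rcases hmark_new k hk' with h' | h'
          · exact Or.inl h'
          · exact Or.inr (h' ▸ hE)
        · exact Or.inr hk'
      · exact fun c hc => s4 c (List.mem_append_left _ hc)
      · intro c hc
        rcases s5 c hc with hc' | hc'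
        · rcases List.mem_append.mp hc' with h' | h'
          · exact Or.inl h'
          · simp only [List.mem_singleton] at h'
            exact Or.inr ⟨idx, hidx7, h' ▸ hcidx.symm, hE⟩
        · exact Or.inr hc'
      · intro k hk7 hk
        rcases s6 k hk7 hk with hk' | hk'
        · rcases hmark_new k hk' with h' | h'
          · exact Or.inl h'
          · subst h'
            right
            apply s4
            rw [hcidx]
            exact List.mem_append_right _ (List.mem_singleton.mpr rfl)
        · exact Or.inr hk'
      · intro v hv7 hex
        rcases hex with ⟨i', hi', hveq⟩
        rcases List.mem_cons.mp hi' with rfl | hi'l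
        · -- direction i: the cell is (nx, ny), so v = idx and it is marked
          have : pvCell a v = (nx, ny) := hveq
          have hvidx : v = idx := by
            have hva : a[v] = (nx, ny) := by
              unfold pvCell at this
              rw [List.getD_eq_getElem _ _ (h7 ▸ hv7)] at this
              exact this
            have : a.idxOf (a[v]'(h7 ▸ hv7)) = v := hnd.idxOf_getElem v (h7 ▸ hv7)
            rw [hva] at this
            rw [hidxdef, ← this]
          rw [hvidx]
          exact s2 idx hmark_idx
        · exact s7 v hv7 ⟨i', hi'l, hveq⟩
    · -- the branch that does nothing
      have hstep : bfsStep a x y (q0, vis) i = (q0, vis) := by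
        simp only [bfsStep, ← hnx, ← hny]
        rw [if_neg hg]
      obtain ⟨s1, s2, s3, s4, s5, s6, s7⟩ := ih hl' q0 vis hlen
      rw [hstep]
      refine ⟨s1, s2, s3, s4, s5, s6, ?_⟩
      intro v hv7 hex
      rcases hex with ⟨i', hi', hveq⟩
      rcases List.mem_cons.mp hi' with rfl | hi'l
      · -- the direction-i neighbor is cell v; the guard having failed, v is already marked
        have hva : (nx, ny) ∈ a := by
          rw [← hveq]
          unfold pvCell
          rw [List.getD_eq_getElem _ _ (h7 ▸ hv7)]
          exact List.getElem_mem _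
        have hvisited : vis.getD (a.idxOf (nx, ny)) 1 ≠ 0 := fun h => hg ⟨hva, h⟩
        have hvidx : a.idxOf (nx, ny) = v := by
          have hva' : a[v]'(h7 ▸ hv7) = (nx, ny) := by
            unfold pvCell at hveq
            rw [List.getD_eq_getElem _ _ (h7 ▸ hv7)] at hveq
            exact hveq
          rw [← hva']
          exact hnd.idxOf_getElem v (h7 ▸ hv7)
        apply s2
        unfold pvMarked
        rw [hvidx] at hvisited
        exact hvisited
      · exact s7 v hv7 ⟨i', hi'l, hveq⟩

def bfsInv (a : List (Int × Int)) (q : List (Int × Int)) (vis : List Int) : Prop :=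
  vis.length = 7 ∧
  (∀ c ∈ q, ∃ u, u < 7 ∧ c = pvCell a u ∧ Relation.ReflTransGen (pvE a) 0 u) ∧
  (∀ k, k < 7 → pvMarked vis k → Relation.ReflTransGen (pvE a) 0 k) ∧
  (∀ u, u < 7 → (pvMarked vis u ∨ u = 0) →
    pvCell a u ∈ q ∨ ∀ v, v < 7 → pvE a u v → pvMarked vis v)

theorem bfsBase (a : List (Int × Int)) (h7 : a.length = 7)
    (vis : List Int) (hInv : bfsInv a [] vis) :
    ((if (0 : Int) ∈ vis then false else true) = true ↔ pvConn a) := by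
  obtain ⟨hlen, hq, hsound, hcomplete⟩ := hInv
  have hall : pvConn a → ∀ k, k < 7 → pvMarked vis k := by
    intro hconn
    -- every reachable vertex except possibly 0 is marked
    have hreach : ∀ w, Relation.ReflTransGen (pvE a) 0 w → w < 7 → pvMarked vis w ∨ w = 0 := by
      intro w hw
      induction hw with
      | refl => intro _; exact Or.inr rfl
      | @tail b c hb hbc ihb =>
        intro _
        have hb7 : b < 7 := h7 ▸ hbc.1
        have hdisc : pvMarked vis b ∨ b = 0 := ihb hb7
        rcases hcomplete b hb7 hdisc with hmem | hall
        · simp at hmem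
        · exact Or.inl (hall c (h7 ▸ hbc.2.1) hbc)
    -- vertex 0 is itself marked, via any neighbour
    have h1 : Relation.ReflTransGen (pvE a) 0 1 := hconn 1 (by omega)
    have h0marked : pvMarked vis 0 := by
      rcases (Relation.ReflTransGen.cases_head h1) with h' | ⟨c, hc, _⟩
      · omega
      · have hc0 : c ≠ 0 := by
          intro h'
          exact pvAdj_irrefl a 0 (h' ▸ hc.2.2)
        have hcreach : Relation.ReflTransGen (pvE a) 0 c := Relation.ReflTransGen.single hc
        have hcmarked : pvMarked vis c := by
          rcases hreach c hcreach (h7 ▸ hc.2.1) with h' | h'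
          · exact h'
          · exact absurd h' hc0
        rcases hcomplete c (h7 ▸ hc.2.1) (Or.inl hcmarked) with hmem | hall
        · simp at hmem
        · exact hall 0 (by omega) (pvE_symm a hc)
    intro k hk
    rcases hreach k (hconn k (by omega)) hk with h' | h'
    · exact h'
    · exact h' ▸ h0marked
  split
  · next hmem =>
    simp only [Bool.false_eq_true, false_iff]
    intro hconn
    obtain ⟨idx, hidx, hv⟩ := List.mem_iff_getElem.mp hmem
    have : ¬ pvMarked vis idx := by
      unfold pvMarked
      rw [List.getD_eq_getElem _ _ hidx, hv]
      simp
    exact this (hall hconn idx (hlen ▸ hidx))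
  · next hmem =>
    simp only [true_iff]
    intro k hk
    have hk7 : k < 7 := h7 ▸ hk
    apply hsound k hk7
    unfold pvMarked
    intro h0
    apply hmem
    have hklen : k < vis.length := hlen ▸ hk7
    rw [List.getD_eq_getElem _ _ hklen] at h0
    rw [← h0]
    exact List.getElem_mem _

theorem bfsLoop_iff (a : List (Int × Int)) (h7 : a.length = 7) (hnd : a.Nodup) :
    ∀ q vis, bfsInv a q vis → (bfsLoop a q vis = true ↔ pvConn a) := by
  intro q vis
  induction q, vis using bfsLoop.induct a with
  | case1 vis hmem =>
    intro hInv
    rw [bfsLoop]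
    exact bfsBase a h7 vis hInv
  | case2 vis hmem =>
    intro hInv
    rw [bfsLoop]
    exact bfsBase a h7 vis hInv
  | case3 vis x y rest st ih =>
    intro ⟨hlen, hq, hsound, hcomplete⟩
    obtain ⟨u, hu7, hucell, hureach⟩ := hq (x, y) List.mem_cons_self
    obtain ⟨s1, s2, s3, s4, s5, s6, s7⟩ :=
      bfsFold_spec a x y u h7 hnd hu7 hucell.symm (List.range 4)
        (fun i hi => List.mem_range.mp hi) rest vis hlen
    rw [bfsLoop]
    apply ih
    refine ⟨s1, ?_, ?_, ?_⟩
    · intro c hc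
      rcases s5 c hc with hc' | ⟨v, hv7, hveq, hvE⟩
      · exact hq c (List.mem_cons_of_mem _ hc')
      · exact ⟨v, hv7, hveq, hureach.tail hvE⟩
    · intro k hk7 hk
      rcases s3 k hk7 hk with hk' | hk'
      · exact hsound k hk7 hk'
      · exact hureach.tail hk'
    · intro w hw7 hdisc
      by_cases hwu : w = u
      · subst hwu
        right
        intro v hv7 hvE
        apply s7 v hv7
        have : ((pvCell a w).1 - (pvCell a v).1).natAbs +
            ((pvCell a w).2 - (pvCell a v).2).natAbs = 1 := hvE.2.2
        rw [hucell.symm] at this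
        obtain ⟨i, hi4, hnx, hny⟩ := (neighbor_iff x y (pvCell a v).1 (pvCell a v).2).mpr this
        exact ⟨i, List.mem_range.mpr hi4, Prod.ext hnx hny⟩
      · rcases hdisc with hwm | hw0
        · -- w was marked in st.2; was it already marked in vis?
          by_cases hold : pvMarked vis w
          · rcases hcomplete w hw7 (Or.inl hold) with hmem | hall
            · rcases List.mem_cons.mp hmem with heq | hmem'
              · exfalso
                apply hwu
                have : pvCell a w = pvCell a u := heq.trans hucell
                have h1 : a[w]'(h7 ▸ hw7) = a[u]'(h7 ▸ hu7) := by
                  unfold pvCell at this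
                  rwa [List.getD_eq_getElem _ _ (h7 ▸ hw7),
                       List.getD_eq_getElem _ _ (h7 ▸ hu7)] at this
                exact (List.Nodup.getElem_inj_iff hnd).mp h1
              · exact Or.inl (s4 _ hmem')
            · exact Or.inr fun v hv7 hvE => s2 v (hall v hv7 hvE)
          · rcases s6 w hw7 hwm with h' | h'
            · exact absurd h' hold
            · exact Or.inl h'
        · -- w = 0 and not previously marked-case folds into the same analysis
          subst hw0
          rcases hcomplete 0 hw7 (Or.inr rfl) with hmem | hall
          · rcases List.mem_cons.mp hmem with heq | hmem'
            · -- the processed cell is vertex 0, i.e. u = 0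
              have : pvCell a 0 = pvCell a u := heq.trans hucell
              have h1 : a[0]'(h7 ▸ hw7) = a[u]'(h7 ▸ hu7) := by
                unfold pvCell at this
                rwa [List.getD_eq_getElem _ _ (h7 ▸ hw7),
                     List.getD_eq_getElem _ _ (h7 ▸ hu7)] at this
              exact absurd ((List.Nodup.getElem_inj_iff hnd).mp h1) hwu
            · exact Or.inl (s4 _ hmem')
          · exact Or.inr fun v hv7 hvE => s2 v (hall v hv7 hvE)

theorem check7_A_iff (a : List (Int × Int)) (h7 : a.length = 7) (hnd : a.Nodup) :
    check_7 a = true ↔ pvConn a := by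
  unfold check_7
  apply bfsLoop_iff a h7 hnd
  refine ⟨by simp, ?_, ?_, ?_⟩
  · intro c hc
    simp only [List.mem_singleton] at hc
    refine ⟨0, by omega, ?_, Relation.ReflTransGen.refl⟩
    rw [hc]
    unfold pvCell
    exact Prod.mk.eta.symm
  · intro k hk7 hk
    exfalso
    apply hk
    rw [List.getD_eq_getElem _ _ (by simpa using hk7)]
    exact List.getElem_replicate _
  · intro u hu7 hdisc
    rcases hdisc with hm | h0
    · exfalso
      apply hm
      rw [List.getD_eq_getElem _ _ (by simpa using hu7)]
      exact List.getElem_replicate _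
    · subst h0
      left
      simp [pvCell]

theorem mergeAt_length (comp : List Int) (i j : Nat) : (mergeAt comp i j).length = comp.length := by
  simp only [mergeAt]; split <;> simp

theorem merge_rel (comp : List Int) (i j : Nat) (hi : i < comp.length) (hj : j < comp.length)
    (k l : Nat) (hk : k < comp.length) (hl : l < comp.length) :
    ((mergeAt comp i j).getD k 0 = (mergeAt comp i j).getD l 0 ↔
      (comp.getD k 0 = comp.getD l 0 ∨
        (comp.getD k 0 = comp.getD i 0 ∧ comp.getD l 0 = comp.getD j 0) ∨
        (comp.getD k 0 = comp.getD j 0 ∧ comp.getD l 0 = comp.getD i 0))) := by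
  simp only [mergeAt]
  set ci := comp.getD i 0 with hci
  set cj := comp.getD j 0 with hcj
  split
  · next hne =>
    rw [List.getD_eq_getElem _ _ (by simpa using hk), List.getD_eq_getElem _ _ (by simpa using hl)]
    rw [List.getD_eq_getElem _ _ hk, List.getD_eq_getElem _ _ hl]
    simp only [List.getElem_map]
    by_cases h1 : comp[k] = ci <;> by_cases h2 : comp[l] = ci <;>
      simp [h1, h2] <;> constructor <;> intro h <;> first | tauto | omega
  · next heq =>
    simp only [ne_eq, not_not] at heq
    constructor
    · intro h; tauto
    · rintro (h | ⟨h1, h2⟩ | ⟨h1, h2⟩) <;> omega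

def pvEdgeStep (a : List (Int × Int)) (comp : List Int) (ij : Nat × Nat) : List Int :=
  if ((a.getD ij.1 (0, 0)).1 - (a.getD ij.2 (0, 0)).1).natAbs +
      ((a.getD ij.1 (0, 0)).2 - (a.getD ij.2 (0, 0)).2).natAbs = 1 then
    mergeAt comp ij.1 ij.2
  else comp

theorem pvEdgeStep_pos (a : List (Int × Int)) (comp : List Int) (i j : Nat)
    (h : pvAdj a i j) : pvEdgeStep a comp (i, j) = mergeAt comp i j := if_pos h

theorem pvEdgeStep_neg (a : List (Int × Int)) (comp : List Int) (i j : Nat)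
    (h : ¬ pvAdj a i j) : pvEdgeStep a comp (i, j) = comp := if_neg h

-- EqvGen of a symmetric+transitive relation collapses
theorem eqvGen_collapse {r : Nat → Nat → Prop} (hs : ∀ k l, r k l → r l k)
    (ht : ∀ k l m, r k l → r l m → r k m) {k l : Nat} (h : Relation.EqvGen r k l) :
    k = l ∨ r k l := by
  induction h with
  | rel _ _ h => exact Or.inr h
  | refl => exact Or.inl rfl
  | symm _ _ _ ih =>
    rcases ih with h | h
    · exact Or.inl h.symm
    · exact Or.inr (hs _ _ h)
  | trans _ _ _ _ _ ih1 ih2 =>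
    rcases ih1 with h1 | h1 <;> rcases ih2 with h2 | h2
    · exact Or.inl (h1.trans h2)
    · exact Or.inr (h1 ▸ h2)
    · exact Or.inr (h2 ▸ h1)
    · exact Or.inr (ht _ _ _ h1 h2)

theorem eqvGen_bind {r s : Nat → Nat → Prop} (h : ∀ k l, r k l → Relation.EqvGen s k l)
    {k l : Nat} (hkl : Relation.EqvGen r k l) : Relation.EqvGen s k l := by
  induction hkl with
  | rel _ _ hr => exact h _ _ hr
  | refl => exact Relation.EqvGen.refl _
  | symm _ _ _ ih => exact ih.symm _ _
  | trans _ _ _ _ _ ih1 ih2 => exact ih1.trans _ _ _ ih2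

theorem eqvGen_congr {r s : Nat → Nat → Prop} (h : ∀ k l, r k l ↔ s k l) {k l : Nat} :
    Relation.EqvGen r k l ↔ Relation.EqvGen s k l :=
  ⟨eqvGen_bind fun k l hr => Relation.EqvGen.rel _ _ ((h k l).mp hr),
   eqvGen_bind fun k l hs => Relation.EqvGen.rel _ _ ((h k l).mpr hs)⟩

theorem applyEdges_spec (a : List (Int × Int)) (n : Nat) (L : List (Nat × Nat))
    (comp : List Int) (R : Nat → Nat → Prop)
    (hlen : comp.length = n)
    (hL : ∀ p ∈ L, p.1 < n ∧ p.2 < n)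
    (hrefl : ∀ k, k < n → R k k)
    (hsymm : ∀ k l, R k l → R l k)
    (htrans : ∀ k l m, R k l → R l m → R k m)
    (hdom : ∀ k l, R k l → k < n ∧ l < n)
    (hcomp : ∀ k l, k < n → l < n → (comp.getD k 0 = comp.getD l 0 ↔ R k l)) :
    (L.foldl (pvEdgeStep a) comp).length = n ∧
    ∀ k l, k < n → l < n →
      ((L.foldl (pvEdgeStep a) comp).getD k 0 = (L.foldl (pvEdgeStep a) comp).getD l 0 ↔
        Relation.EqvGen (fun u v => R u v ∨ ((u, v) ∈ L ∧ pvAdj a u v)) k l) := by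
  induction L generalizing comp R with
  | nil =>
    refine ⟨hlen, fun k l hk hl => ?_⟩
    simp only [List.foldl_nil]
    rw [hcomp k l hk hl]
    constructor
    · intro h; exact Relation.EqvGen.rel _ _ (Or.inl h)
    · intro h
      rcases eqvGen_collapse
        (fun k l h => by
          rcases h with h | h
          · exact Or.inl (hsymm _ _ h)
          · simp at h)
        (fun k l m h1 h2 => by
          rcases h1 with h1 | h1
          · rcases h2 with h2 | h2
            · exact Or.inl (htrans _ _ _ h1 h2)
            · simp at h2
          · simp at h1) h with h | h
      · exact h ▸ hrefl _ hk
      · rcases h with h | h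
        · exact h
        · simp at h
  | cons e L ih =>
    obtain ⟨i, j⟩ := e
    have hij : i < n ∧ j < n := hL (i, j) (by simp)
    by_cases hadj : pvAdj a i j
    · -- merged: new relation R', new comp
      set R' : Nat → Nat → Prop :=
        fun u v => R u v ∨ (R u i ∧ R j v) ∨ (R u j ∧ R i v) with hR'
      have hstep : pvEdgeStep a comp (i, j) = mergeAt comp i j := by
        exact pvEdgeStep_pos a comp i j hadj
      have hlen' : (mergeAt comp i j).length = n := by rw [mergeAt_length]; exact hlen
      have hcomp' : ∀ k l, k < n → l < n →
          ((mergeAt comp i j).getD k 0 = (mergeAt comp i j).getD l 0 ↔ R' k l) := by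
        intro k l hk hl
        rw [merge_rel comp i j (hlen ▸ hij.1) (hlen ▸ hij.2) k l (hlen ▸ hk) (hlen ▸ hl)]
        rw [hcomp k l hk hl, hcomp k i hk hij.1, hcomp l j hl hij.2,
            hcomp k j hk hij.2, hcomp l i hl hij.1]
        constructor
        · rintro (h | ⟨h1, h2⟩ | ⟨h1, h2⟩)
          · exact Or.inl h
          · exact Or.inr (Or.inl ⟨h1, hsymm _ _ h2⟩)
          · exact Or.inr (Or.inr ⟨h1, hsymm _ _ h2⟩)
        · rintro (h | ⟨h1, h2⟩ | ⟨h1, h2⟩)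
          · exact Or.inl h
          · exact Or.inr (Or.inl ⟨h1, hsymm _ _ h2⟩)
          · exact Or.inr (Or.inr ⟨h1, hsymm _ _ h2⟩)
      have hrefl' : ∀ k, k < n → R' k k := fun k hk => Or.inl (hrefl k hk)
      have hsymm' : ∀ k l, R' k l → R' l k := by
        rintro k l (h | ⟨h1, h2⟩ | ⟨h1, h2⟩)
        · exact Or.inl (hsymm _ _ h)
        · exact Or.inr (Or.inr ⟨hsymm _ _ h2, hsymm _ _ h1⟩)
        · exact Or.inr (Or.inl ⟨hsymm _ _ h2, hsymm _ _ h1⟩)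
      have htrans' : ∀ k l m, R' k l → R' l m → R' k m := by
        rintro k l m (h1 | ⟨h1, h1'⟩ | ⟨h1, h1'⟩) (h2 | ⟨h2, h2'⟩ | ⟨h2, h2'⟩)
        · exact Or.inl (htrans _ _ _ h1 h2)
        · exact Or.inr (Or.inl ⟨htrans _ _ _ h1 h2, h2'⟩)
        · exact Or.inr (Or.inr ⟨htrans _ _ _ h1 h2, h2'⟩)
        · exact Or.inr (Or.inl ⟨h1, htrans _ _ _ h1' h2⟩)
        · exact Or.inr (Or.inl ⟨h1, h2'⟩)
        · exact Or.inl (htrans _ _ _ h1 h2')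
        · exact Or.inr (Or.inr ⟨h1, htrans _ _ _ h1' h2⟩)
        · exact Or.inl (htrans _ _ _ h1 h2')
        · exact Or.inr (Or.inr ⟨h1, h2'⟩)
      have hdom' : ∀ k l, R' k l → k < n ∧ l < n := by
        rintro k l (h | ⟨h1, h2⟩ | ⟨h1, h2⟩)
        · exact hdom _ _ h
        · exact ⟨(hdom _ _ h1).1, (hdom _ _ h2).2⟩
        · exact ⟨(hdom _ _ h1).1, (hdom _ _ h2).2⟩
      obtain ⟨hfl, hfr⟩ := ih (mergeAt comp i j) R' hlen'
        (fun p hp => hL p (List.mem_cons_of_mem _ hp)) hrefl' hsymm' htrans' hdom' hcomp'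
      refine ⟨by simpa [hstep] using hfl, fun k l hk hl => ?_⟩
      simp only [List.foldl_cons, hstep]
      rw [hfr k l hk hl]
      constructor
      · refine eqvGen_bind ?_
        rintro u v ((h | ⟨h1, h2⟩ | ⟨h1, h2⟩) | ⟨hm, ha⟩)
        · exact Relation.EqvGen.rel _ _ (Or.inl h)
        · refine Relation.EqvGen.trans u i v (Relation.EqvGen.rel _ _ (Or.inl h1))
            (Relation.EqvGen.trans i j v ?_ (Relation.EqvGen.rel _ _ (Or.inl h2)))
          exact Relation.EqvGen.rel _ _ (Or.inr ⟨List.mem_cons_self, hadj⟩)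
        · refine Relation.EqvGen.trans u j v (Relation.EqvGen.rel _ _ (Or.inl h1))
            (Relation.EqvGen.trans j i v (Relation.EqvGen.symm i j ?_)
              (Relation.EqvGen.rel _ _ (Or.inl h2)))
          exact Relation.EqvGen.rel _ _ (Or.inr ⟨List.mem_cons_self, hadj⟩)
        · exact Relation.EqvGen.rel _ _ (Or.inr ⟨List.mem_cons_of_mem _ hm, ha⟩)
      · refine eqvGen_bind ?_
        rintro u v (h | ⟨hm, ha⟩)
        · exact Relation.EqvGen.rel _ _ (Or.inl (Or.inl h))
        · rcases List.mem_cons.mp hm with he | hm'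
          · simp only [Prod.mk.injEq] at he
            obtain ⟨rfl, rfl⟩ := he
            refine Relation.EqvGen.rel _ _ (Or.inl ?_)
            rw [hR']
            beta_reduce
            exact Or.inr (Or.inl (And.intro (hrefl _ hij.1) (hrefl _ hij.2)))
          · exact Relation.EqvGen.rel _ _ (Or.inr ⟨hm', ha⟩)
    · -- not adjacent: step is identity, and the head edge never contributes
      have hstep : pvEdgeStep a comp (i, j) = comp := by
        exact pvEdgeStep_neg a comp i j hadj
      obtain ⟨hfl, hfr⟩ := ih comp R hlen
        (fun p hp => hL p (List.mem_cons_of_mem _ hp)) hrefl hsymm htrans hdom hcomp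
      refine ⟨by simpa [hstep] using hfl, fun k l hk hl => ?_⟩
      simp only [List.foldl_cons, hstep]
      rw [hfr k l hk hl]
      apply eqvGen_congr
      intro u v
      constructor
      · rintro (h | ⟨hm, ha⟩)
        · exact Or.inl h
        · exact Or.inr ⟨List.mem_cons_of_mem _ hm, ha⟩
      · rintro (h | ⟨hm, ha⟩)
        · exact Or.inl h
        · rcases List.mem_cons.mp hm with he | hm'
          · exfalso
            simp only [Prod.mk.injEq] at he
            obtain ⟨rfl, rfl⟩ := he
            exact hadj ha
          · exact Or.inr ⟨hm', ha⟩



def pvPairs (n : Nat) : List (Nat × Nat) :=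
  (List.range n).flatMap (fun i => (List.range i).map (fun j => (i, j)))

theorem double_fold_eq (a : List (Int × Int)) (comp : List Int) :
    (List.range a.length).foldl (fun comp i =>
      (List.range i).foldl (fun comp j =>
        if ((a.getD i (0, 0)).1 - (a.getD j (0, 0)).1).natAbs +
            ((a.getD i (0, 0)).2 - (a.getD j (0, 0)).2).natAbs = 1 then
          mergeAt comp i j
        else comp) comp) comp
    = (pvPairs a.length).foldl (pvEdgeStep a) comp := by
  rw [pvPairs, List.foldl_flatMap]
  congr 1
  funext c i
  rw [List.foldl_map]
  rfl

theorem mem_pvPairs (n i j : Nat) : ((i, j) ∈ pvPairs n) ↔ j < i ∧ i < n := by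
  simp [pvPairs]
  aesop

-- the initial labelling: distinct labels
theorem init_comp_rel (n : Nat) (k l : Nat) (hk : k < n) (hl : l < n) :
    (((List.range n).map Int.ofNat).getD k 0 = ((List.range n).map Int.ofNat).getD l 0) ↔ k = l := by
  rw [List.getD_eq_getElem _ _ (by simpa using hk), List.getD_eq_getElem _ _ (by simpa using hl)]
  simp

theorem eqvGen_iff_rtg (a : List (Int × Int)) (k l : Nat) :
    Relation.EqvGen (fun u v => (u < a.length ∧ v < a.length ∧ u = v) ∨
        ((u, v) ∈ pvPairs a.length ∧ pvAdj a u v)) k l ↔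
      Relation.ReflTransGen (pvE a) k l := by
  constructor
  · intro h
    induction h with
    | rel u v h =>
      rcases h with ⟨_, _, rfl⟩ | ⟨hm, ha⟩
      · exact Relation.ReflTransGen.refl
      · rw [mem_pvPairs] at hm
        exact Relation.ReflTransGen.single ⟨hm.2, lt_trans hm.1 hm.2, ha⟩
    | refl => exact Relation.ReflTransGen.refl
    | symm _ _ _ ih => exact Relation.ReflTransGen.symmetric (pvE_symm a) ih
    | trans _ _ _ _ _ ih1 ih2 => exact Relation.ReflTransGen.trans ih1 ih2
  · intro h
    induction h with
    | refl => exact Relation.EqvGen.refl _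
    | @tail b c hbc he ih =>
      refine ih.trans _ _ _ ?_
      obtain ⟨hb, hc, ha⟩ := he
      rcases Nat.lt_trichotomy b c with hlt | heq | hgt
      · exact Relation.EqvGen.symm _ _ (Relation.EqvGen.rel _ _
          (Or.inr ⟨(mem_pvPairs _ _ _).mpr ⟨hlt, hc⟩, pvAdj_symm a b c ha⟩))
      · exact absurd (heq ▸ ha) (pvAdj_irrefl a b)
      · exact Relation.EqvGen.rel _ _ (Or.inr ⟨(mem_pvPairs _ _ _).mpr ⟨hgt, hb⟩, ha⟩)

theorem check7_B_iff (a : List (Int × Int)) (h7 : a.length = 7) :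
    check_7_alt a = true ↔ pvConn a := by
  have hn : 0 < a.length := by omega
  unfold check_7_alt
  rw [double_fold_eq]
  simp only [h7, decide_true, Bool.true_and]
  rw [← h7]
  set comp := (pvPairs a.length).foldl (pvEdgeStep a) ((List.range a.length).map Int.ofNat) with hcomp
  obtain ⟨hlen, hrel⟩ := applyEdges_spec a a.length (pvPairs a.length)
    ((List.range a.length).map Int.ofNat)
    (fun u v => u < a.length ∧ v < a.length ∧ u = v)
    (by simp)
    (fun p hp => by
      rw [mem_pvPairs] at hp; exact ⟨hp.2, lt_trans hp.1 hp.2⟩)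
    (fun k hk => ⟨hk, hk, rfl⟩)
    (fun k l h => ⟨h.2.1, h.1, h.2.2.symm⟩)
    (fun k l m h1 h2 => ⟨h1.1, h2.2.1, h1.2.2.trans h2.2.2⟩)
    (fun k l h => ⟨h.1, h.2.1⟩)
    (fun k l hk hl => by rw [init_comp_rel _ _ _ hk hl]; constructor
                         · exact fun h => ⟨hk, hl, h⟩
                         · exact fun h => h.2.2)
  rw [← hcomp] at hlen hrel
  constructor
  · intro hall k hk
    rw [List.all_eq_true] at hall
    have h0 : (0 : Nat) < a.length := hn
    have hek := hrel k 0 hk h0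
    rw [← eqvGen_iff_rtg a 0 k]
    have hmemk : comp.getD k 0 ∈ comp := by
      rw [List.getD_eq_getElem _ _ (hlen ▸ hk)]
      exact List.getElem_mem _
    have := hall _ hmemk
    rw [beq_iff_eq] at this
    refine Relation.EqvGen.symm _ _ ((hek).mp ?_)
    rw [this]
  · intro hconn
    rw [List.all_eq_true]
    intro c hc
    obtain ⟨k, hk, rfl⟩ := List.getElem_of_mem hc
    rw [beq_iff_eq]
    have hk' : k < a.length := hlen ▸ hk
    have := (hrel k 0 hk' hn).mpr
      (Relation.EqvGen.symm _ _ ((eqvGen_iff_rtg a 0 k).mpr (hconn k hk')))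
    rw [List.getD_eq_getElem _ _ hk] at this
    exact this

-- on a shorter input A's fixed-size visited array keeps an everlasting 0: A returns False
theorem bfsFold_len (a : List (Int × Int)) (x y : Int) (l : List Nat)
    (q : List (Int × Int)) (vis : List Int) :
    (l.foldl (bfsStep a x y) (q, vis)).2.length = vis.length := by
  induction l generalizing q vis with
  | nil => rfl
  | cons i l ih =>
    simp only [List.foldl_cons, bfsStep]
    split
    · rcases hst : (q ++ [_], vis.set (a.idxOf _) 1) with ⟨q', vis'⟩
      simp only [Prod.mk.injEq] at hst
      rw [← hst.1, ← hst.2, ih]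
      simp
    · exact ih q vis

theorem bfsFold_mark_lt (a : List (Int × Int)) (x y : Int) (l : List Nat)
    (q : List (Int × Int)) (vis : List Int) (k : Nat)
    (h : pvMarked (l.foldl (bfsStep a x y) (q, vis)).2 k) :
    pvMarked vis k ∨ k < a.length := by
  induction l generalizing q vis with
  | nil => exact Or.inl h
  | cons i l ih =>
    simp only [List.foldl_cons, bfsStep] at h
    split at h
    · next hg =>
      rcases ih _ _ h with h' | h'
      · by_cases hk : a.idxOf (x + pvDx.getD i 0, y + pvDy.getD i 0) = k
        · exact Or.inr (hk ▸ List.idxOf_lt_length_of_mem hg.1)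
        · unfold pvMarked at h'
          rw [getD_set_ne _ _ _ _ hk] at h'
          exact Or.inl h'
      · exact Or.inr h'
    · exact ih _ _ h

theorem bfsLoop_short (a : List (Int × Int)) (hlt : a.length < 7) :
    ∀ q vis, vis.length = 7 → ¬ pvMarked vis a.length → bfsLoop a q vis = false := by
  intro q vis
  induction q, vis using bfsLoop.induct a with
  | case1 vis hmem =>
    intro _ _
    rw [bfsLoop]
    simp [hmem]
  | case2 vis hmem =>
    intro hlen hm
    exfalso
    apply hmem
    have h0 : vis.getD a.length 1 = 0 := not_not.mp hm
    rw [List.getD_eq_getElem _ _ (by omega)] at h0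
    rw [← h0]
    exact List.getElem_mem _
  | case3 vis x y rest st ih =>
    intro hlen hm
    rw [bfsLoop]
    apply ih
    · rw [bfsFold_len]; exact hlen
    · intro hmark
      rcases bfsFold_mark_lt a x y (List.range 4) rest vis a.length hmark with h' | h'
      · exact hm h'
      · omega

-- ===== VERDICT (by name: the statement is the Claim_ definition above) =====
theorem check_7_spec : Claim_equal_check_7 := by
  intro a _ hpre
  obtain ⟨hne, hle, hnd7⟩ := hpre
  unfold Spec_check_7
  by_cases h7 : a.length = 7
  · have hA := check7_A_iff a h7 (hnd7 h7)
    have hB := check7_B_iff a h7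
    cases hA' : check_7 a <;> cases hB' : check_7_alt a <;> simp_all
  · have hlt : a.length < 7 := by omega
    have hA : check_7 a = false := by
      unfold check_7
      apply bfsLoop_short a hlt
      · simp
      · unfold pvMarked
        rw [not_not, List.getD_eq_getElem _ _ (by simpa using hlt)]
        exact List.getElem_replicate _
    have hB : check_7_alt a = false := by
      unfold check_7_alt
      simp [h7]
    rw [hA, hB]
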